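-- pv_equiv track=rewrite | github.com/pzhang333/ab-testing | logs/process.py | user_returned
-- ===== SOURCE A (Python) =====
-- def user_returned(logs):
--     clicked_checkout = False
--     for log in logs:
--         if log[3] == "C":
--             clicked_checkout = True
--         if clicked_checkout and log[3] != "C":
--             return True
--     return False
-- ===== SOURCE B (Python) =====
-- def user_returned(logs):
--     c_idx = [i for i, log in enumerate(logs) if log[3] == "C"]
--     n_idx = [i for i, log in enumerate(logs) if log[3] != "C"]
--     return len(c_idx) > 0 and len(n_idx) > 0 and c_idx[0] < n_idx[-1]
-- ===== Notes on version B (the rewrite author's own statement) =====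
-- stated objective: alternative
-- what changed: Replaced the flag-carrying early-return state machine by an index-arithmetic formulation: collect the indices of "C" logs and of non-"C" logs and return whether the minimum C-index is smaller than the maximum non-C-index.
import Mathlib
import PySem

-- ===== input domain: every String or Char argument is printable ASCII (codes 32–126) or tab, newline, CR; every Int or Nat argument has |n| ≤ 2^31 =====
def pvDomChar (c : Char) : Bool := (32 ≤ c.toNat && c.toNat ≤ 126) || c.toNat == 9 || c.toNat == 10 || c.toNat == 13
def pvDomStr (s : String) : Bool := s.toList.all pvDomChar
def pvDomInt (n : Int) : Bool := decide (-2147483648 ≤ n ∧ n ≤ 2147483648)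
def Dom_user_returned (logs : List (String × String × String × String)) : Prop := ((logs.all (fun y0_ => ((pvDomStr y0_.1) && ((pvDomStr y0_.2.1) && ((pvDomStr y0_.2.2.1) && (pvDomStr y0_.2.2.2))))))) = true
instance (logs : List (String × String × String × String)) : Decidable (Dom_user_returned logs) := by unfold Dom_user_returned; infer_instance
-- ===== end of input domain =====

-- B replaces A's flag-carrying early-return state machine by an index-arithmetic
-- formulation: collect the indices of "C" logs and of non-"C" logs, and compare
-- the first C-index with the last non-C-index (alternative decomposition, same cost).

-- ===== PORT A =====
-- literal transliteration of A's loop: the flag is the accumulator of a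
-- structural recursion, with the two ifs in A's order
def userReturnedLoop (clicked : Bool)
    (logs : List (String × String × String × String)) : Bool :=
  match logs with
  | [] => false
  | log :: rest =>
    let clicked' := if log.2.2.2 == "C" then true else clicked
    if clicked' && !(log.2.2.2 == "C") then true
    else userReturnedLoop clicked' rest

def user_returned (logs : List (String × String × String × String)) : Bool :=
  userReturnedLoop false logs

-- ===== PORT B =====
-- Source B: two index comprehensions over enumerate(logs), then
-- len(c)>0 and len(n)>0 and c[0] < n[-1]
def user_returned_alt (logs : List (String × String × String × String)) : Bool :=
  let cIdx := ((PySem.List.enumerate logs).filter (fun p => p.2.2.2.2 == "C")).map Prod.fst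
  let nIdx := ((PySem.List.enumerate logs).filter (fun p => !(p.2.2.2.2 == "C"))).map Prod.fst
  match cIdx.head?, nIdx.getLast? with
  | some c, some n => decide (c < n)
  | _, _ => false

-- ===== PRECONDITION & SPEC =====
def Spec_user_returned (logs : List (String × String × String × String)) (out : Bool) : Prop := out = user_returned_alt logs
instance (logs : List (String × String × String × String)) (out : Bool) : Decidable (Spec_user_returned logs out) := by unfold Spec_user_returned; infer_instance

-- ===== CLAIM (what is proved, stated in full; the proofs are below) =====
def Claim_equal_user_returned : Prop := ∀ (logs : List (String × String × String × String)), Dom_user_returned logs → Spec_user_returned logs (user_returned logs)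

-- ===== LEMMAS AND PROOFS =====

theorem mem_enumerate_fst_le {α : Type} {xs : List α} {s : Int} {p : Int × α}
    (h : p ∈ PySem.List.enumerate xs s) : s ≤ p.1 := by
  rcases (PySem.List.mem_enumerate_iff _ _ _).1 h with ⟨k, hk, rfl⟩
  simp

-- once the flag is set, A's loop is exactly "some later log is not C"
theorem userReturnedLoop_true (logs : List (String × String × String × String)) :
    userReturnedLoop true logs = logs.any (fun l => !(l.2.2.2 == "C")) := by
  induction logs with
  | nil => rfl
  | cons l rest ih =>
    simp only [userReturnedLoop, List.any_cons]
    by_cases h : l.2.2.2 == "C"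
    · simp [h, ih]
    · simp [h]

-- the non-C index list is empty iff no log is non-C
theorem nIdx_nil_iff (s : Int) (logs : List (String × String × String × String)) :
    ((PySem.List.enumerate logs s).filter (fun p => !(p.2.2.2.2 == "C"))) = []
      ↔ logs.any (fun l => !(l.2.2.2 == "C")) = false := by
  simp only [List.filter_eq_nil_iff, List.any_eq_false]
  constructor
  · intro h l hl
    rcases List.mem_iff_getElem.1 hl with ⟨k, hk, rfl⟩
    have : (s + (k : Int), logs[k]) ∈ PySem.List.enumerate logs s :=
      (PySem.List.mem_enumerate_iff _ _ _).2 ⟨k, hk, rfl⟩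
    have := h _ this
    simpa using this
  · intro h p hp
    rcases (PySem.List.mem_enumerate_iff _ _ _).1 hp with ⟨k, hk, rfl⟩
    have := h logs[k] (List.getElem_mem hk)
    simpa using this

theorem loop_false_eq_altAux (logs : List (String × String × String × String)) (s : Int) :
    userReturnedLoop false logs =
      (match (((PySem.List.enumerate logs s).filter (fun p => p.2.2.2.2 == "C")).map Prod.fst).head?,
             (((PySem.List.enumerate logs s).filter (fun p => !(p.2.2.2.2 == "C"))).map Prod.fst).getLast? with
       | some c, some n => decide (c < n)
       | _, _ => false) := by
  induction logs generalizing s with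
  | nil => simp [userReturnedLoop, PySem.List.enumerate_nil]
  | cons l rest ih =>
    rw [PySem.List.enumerate_cons]
    by_cases h : l.2.2.2 == "C"
    · -- first entry is a C: loop switches to flag-true; B compares s with last non-C index
      simp only [userReturnedLoop, h, if_true, Bool.not_true, Bool.and_false,
        Bool.false_eq_true, if_false, List.filter_cons]
      rw [userReturnedLoop_true]
      simp only [List.map_cons, List.head?_cons]
      cases hn : ((PySem.List.enumerate rest (s+1)).filter (fun p => !(p.2.2.2.2 == "C"))) with
      | nil =>
        have := (nIdx_nil_iff (s+1) rest).1 hn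
        simp [this]
      | cons q t =>
        have hq : q ∈ (PySem.List.enumerate rest (s+1)).filter (fun p => !(p.2.2.2.2 == "C")) := by
          simp [hn]
        have hmem := List.mem_of_mem_filter hq
        have hne : rest.any (fun l => !(l.2.2.2 == "C")) = true := by
          by_contra hf
          have hf' : rest.any (fun l => !(l.2.2.2 == "C")) = false := by
            cases hx : rest.any (fun l => !(l.2.2.2 == "C")) <;> simp_all
          have := (nIdx_nil_iff (s+1) rest).2 hf'
          rw [this] at hn; simp at hn
        have hlast : ((q :: t).map Prod.fst).getLast? ≠ none := by
          simp [List.getLast?_eq_none_iff]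
        cases hl : ((q :: t).map Prod.fst).getLast? with
        | none => exact absurd hl hlast
        | some n =>
          have hnmem : n ∈ (q :: t).map Prod.fst := List.mem_of_getLast? hl
          rcases List.mem_map.1 hnmem with ⟨p, hp, rfl⟩
          have hp' : p ∈ (PySem.List.enumerate rest (s+1)).filter (fun x => !(x.2.2.2.2 == "C")) := by
            rw [hn]; exact hp
          have hge : s + 1 ≤ p.1 := mem_enumerate_fst_le (List.mem_of_mem_filter hp')
          simp only [hne]
          have : s < p.1 := by omega
          simp [this]
    · -- first entry is not a C: B prepends s to the non-C list; comparison unchanged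
      simp only [userReturnedLoop, h, if_false, Bool.false_and, Bool.false_eq_true,
        List.filter_cons]
      simp only [Bool.not_false, if_true]
      rw [ih (s+1)]
      cases hc : ((PySem.List.enumerate rest (s+1)).filter (fun p => p.2.2.2.2 == "C")) with
      | nil => simp
      | cons q t =>
        simp only [List.map_cons, List.head?_cons]
        have hq : q ∈ (PySem.List.enumerate rest (s+1)).filter (fun p => p.2.2.2.2 == "C") := by
          simp [hc]
        have hge : s + 1 ≤ q.1 := mem_enumerate_fst_le (List.mem_of_mem_filter hq)
        cases hn : ((PySem.List.enumerate rest (s+1)).filter (fun p => !(p.2.2.2.2 == "C"))) with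
        | nil =>
          simp only [List.map_nil, List.getLast?_singleton]
          have : ¬ (q.1 < s) := by omega
          simp [this]
        | cons r u =>
          simp only [List.map_cons, List.getLast?_cons_cons]

-- ===== VERDICT (by name: the statement is the Claim_ definition above) =====
theorem user_returned_spec : Claim_equal_user_returned := by
  intro logs _
  unfold Spec_user_returned user_returned user_returned_alt
  exact loop_false_eq_altAux logs 0
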